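-- pv_equiv track=rewrite | github.com/WilliamZDR/API2 | app.py | pop_dic
-- ===== SOURCE A (Python) =====
-- def pop_dic(dic, pos=0):
--     ids = list(dic.keys())
--     dados = list(dic.values())
--
--     dic_final = {}
--     for verificador in range(len(ids)):
--         if verificador != pos:
--             id = ids[verificador]
--             dado = dados[verificador]
--             dic_final[id] = dado
--
--     return dic_final
-- ===== SOURCE B (Python) =====
-- def pop_dic(dic, pos=0):
--     d = dict(dic)
--     keys = list(dic)
--     if 0 <= pos < len(keys):
--         del d[keys[pos]]
--     return d
-- ===== Notes on version B (the rewrite author's own statement) =====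
-- stated objective: simpler
-- what changed: B copies the dict once and deletes the single key at the given position (guarded so out-of-range or negative pos is a no-op), instead of A's index loop that rebuilds the dict entry by entry while skipping one index.
import Mathlib
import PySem

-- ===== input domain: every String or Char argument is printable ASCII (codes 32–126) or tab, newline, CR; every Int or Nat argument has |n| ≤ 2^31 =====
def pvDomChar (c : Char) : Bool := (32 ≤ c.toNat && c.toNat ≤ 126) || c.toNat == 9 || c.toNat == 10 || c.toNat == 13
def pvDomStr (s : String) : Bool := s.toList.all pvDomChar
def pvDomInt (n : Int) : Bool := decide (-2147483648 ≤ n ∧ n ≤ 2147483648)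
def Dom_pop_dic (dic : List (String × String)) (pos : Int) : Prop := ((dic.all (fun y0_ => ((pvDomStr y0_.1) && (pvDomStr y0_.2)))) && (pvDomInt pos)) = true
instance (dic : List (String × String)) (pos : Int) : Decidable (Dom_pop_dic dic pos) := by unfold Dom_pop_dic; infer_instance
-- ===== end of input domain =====

-- B copies the dict once and deletes the key at position pos (no-op when pos is out of range),
-- instead of A's index loop that rebuilds the dict entry by entry while skipping one index.

-- ===== PORT A =====
def pop_dic (dic : List (String × String)) (pos : Int) : List (String × String) :=
  let d := PySem.Dict.ofList dic
  let ids := d.keys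
  let dados := d.values
  let dic_final := (PySem.List.pyRange 0 (PySem.List.len ids) 1).foldl
    (fun acc verificador =>
      if verificador ≠ pos then
        let id := PySem.List.pyGetD ids verificador ""
        let dado := PySem.List.pyGetD dados verificador ""
        acc.insert id dado
      else acc)
    PySem.Dict.empty
  dic_final.items

-- ===== PORT B =====
def pop_dic_alt (dic : List (String × String)) (pos : Int) : List (String × String) :=
  let d := PySem.Dict.ofList dic
  let keys := d.keys
  if 0 ≤ pos ∧ pos < PySem.List.len keys then
    (d.erase (PySem.List.pyGetD keys pos "")).items
  else d.items

-- ===== PRECONDITION & SPEC =====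
def Spec_pop_dic (dic : List (String × String)) (pos : Int) (out : List (String × String)) : Prop := out = pop_dic_alt dic pos
instance (dic : List (String × String)) (pos : Int) (out : List (String × String)) : Decidable (Spec_pop_dic dic pos out) := by unfold Spec_pop_dic; infer_instance

-- ===== CLAIM (what is proved, stated in full; the proofs are below) =====
def Claim_equal_pop_dic : Prop := ∀ (dic : List (String × String)) (pos : Int), Dom_pop_dic dic pos → Spec_pop_dic dic pos (pop_dic dic pos)

-- ===== LEMMAS AND PROOFS =====

-- A's loop over the enumerated items, starting at index s with accumulator acc whose keys are
-- disjoint from those of ps: it appends ps minus the entry at (absolute) index pos - s.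
theorem foldA_items (ps : List (String × String)) (pos : Int) :
    ∀ (s : Int) (acc : PySem.Dict String String),
    (ps.map Prod.fst).Nodup →
    (∀ p ∈ ps, acc.contains p.1 = false) →
    ((PySem.List.enumerate ps s).foldl
      (fun acc q => if q.1 ≠ pos then acc.insert q.2.1 q.2.2 else acc) acc).items
    = acc.items ++ (if 0 ≤ pos - s ∧ pos - s < (ps.length : Int)
        then ps.eraseIdx (pos - s).toNat else ps) := by
  induction ps with
  | nil =>
    intro s acc _ _
    simp [PySem.List.enumerate_nil]
  | cons p t ih =>
    intro s acc hnd hfresh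
    rw [List.map_cons] at hnd
    obtain ⟨hp1, hndt⟩ := List.nodup_cons.mp hnd
    rw [PySem.List.enumerate_cons, List.foldl_cons]
    by_cases hs : s = pos
    · subst hs
      simp only [ne_eq, not_true_eq_false, if_false]
      rw [ih (s + 1) acc hndt (fun q hq => hfresh q (List.mem_cons_of_mem _ hq))]
      have h1 : ¬ (0 ≤ s - (s + 1) ∧ s - (s + 1) < (t.length : Int)) := by omega
      have h2 : (0 ≤ s - s ∧ s - s < ((p :: t).length : Int)) := by
        simp
      rw [if_neg h1, if_pos h2]
      have h0 : (s - s).toNat = 0 := by omega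
      rw [h0, List.eraseIdx_cons_zero]
    · simp only [ne_eq, hs, not_false_eq_true, if_pos]
      have hfp : acc.contains p.1 = false := hfresh p (List.mem_cons_self ..)
      have hfresh' : ∀ q ∈ t, (acc.insert p.1 p.2).contains q.1 = false := by
        intro q hq
        rw [PySem.Dict.contains_insert]
        have : q.1 ≠ p.1 := by
          intro h
          exact hp1 (h ▸ (List.mem_map_of_mem hq))
        simp [this, hfresh q (List.mem_cons_of_mem _ hq)]
      rw [ih (s + 1) (acc.insert p.1 p.2) hndt hfresh',
          PySem.Dict.items_insert_of_not_contains acc p.2 hfp]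
      by_cases hr : 0 ≤ pos - s ∧ pos - s < ((p :: t).length : Int)
      · have hr' : 0 ≤ pos - (s + 1) ∧ pos - (s + 1) < (t.length : Int) := by
          simp only [List.length_cons] at hr; push_cast at hr; omega
        rw [if_pos hr, if_pos hr']
        have hk : (pos - s).toNat = (pos - (s + 1)).toNat + 1 := by omega
        simp [hk, List.eraseIdx_cons_succ]
      · have hr' : ¬ (0 ≤ pos - (s + 1) ∧ pos - (s + 1) < (t.length : Int)) := by
          simp only [List.length_cons] at hr; push_cast at hr; omega
        rw [if_neg hr, if_neg hr']
        simp

-- Filtering out the (unique) occurrence of the key at index i is erasing index i.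
theorem filter_key_eq_eraseIdx (ps : List (String × String)) :
    ∀ (i : Nat) (k : String), (hi : i < ps.length) →
    (ps.map Prod.fst).Nodup → (ps[i]'hi).1 = k →
    ps.filter (fun p => !(p.1 == k)) = ps.eraseIdx i := by
  induction ps with
  | nil => intro i k hi; simp at hi
  | cons p t ih =>
    intro i k hi hnd hk
    rw [List.map_cons] at hnd
    obtain ⟨hp1, hndt⟩ := List.nodup_cons.mp hnd
    cases i with
    | zero =>
      simp only [List.getElem_cons_zero] at hk
      subst hk
      rw [List.eraseIdx_cons_zero, List.filter_cons_of_neg (by simp)]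
      apply List.filter_eq_self.mpr
      intro q hq
      have hne : q.1 ≠ p.1 := fun h => hp1 (h ▸ (List.mem_map_of_mem hq))
      simp [hne]
    | succ j =>
      simp only [List.getElem_cons_succ] at hk
      have hj : j < t.length := by simpa using hi
      have hne : p.1 ≠ k := by
        intro h
        apply hp1
        rw [h, ← hk]
        exact List.mem_map_of_mem (List.getElem_mem hj)
      rw [List.eraseIdx_cons_succ, List.filter_cons_of_pos (by simp [hne]),
          ih j k hj hndt hk]

-- ===== VERDICT (by name: the statement is the Claim_ definition above) =====
theorem pop_dic_spec : Claim_equal_pop_dic := by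
  intro dic pos _
  unfold Spec_pop_dic pop_dic pop_dic_alt
  simp only []
  set d := PySem.Dict.ofList dic with hd
  set ps := d.items with hps
  have hnd : (ps.map Prod.fst).Nodup := by
    simpa [PySem.Dict.keys] using PySem.Dict.nodup_keys_ofList dic
  -- rewrite A's index loop as a fold over the enumerated items
  have hkeys : d.keys = ps.map Prod.fst := rfl
  have hvals : d.values = ps.map Prod.snd := rfl
  have hbody : ∀ (acc : PySem.Dict String String) (v : Int),
      (if v ≠ pos then
        acc.insert (PySem.List.pyGetD d.keys v "") (PySem.List.pyGetD d.values v "")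
      else acc)
      = (fun (acc : PySem.Dict String String) (q : Int × (String × String)) =>
          if q.1 ≠ pos then acc.insert q.2.1 q.2.2 else acc) acc
          (v, PySem.List.pyGetD ps v ("", "")) := by
    intro acc v
    simp only [hkeys, hvals]
    rw [show ("" : String) = (("", "") : String × String).1 from rfl]
    rw [PySem.List.pyGetD_map Prod.fst ps v ("", "")]
    rw [show ((PySem.List.pyGetD (ps.map Prod.snd) v ("", "").2 : String)) = Prod.snd (PySem.List.pyGetD ps v ("", "")) from PySem.List.pyGetD_map Prod.snd ps v ("", "")]
  have hlen : PySem.List.len d.keys = PySem.List.len ps := by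
    simp [hkeys]
  have hfoldA :
      ((PySem.List.pyRange 0 (PySem.List.len d.keys) 1).foldl
        (fun acc verificador =>
          if verificador ≠ pos then
            acc.insert (PySem.List.pyGetD d.keys verificador "")
              (PySem.List.pyGetD d.values verificador "")
          else acc) PySem.Dict.empty)
      = ((PySem.List.enumerate ps 0).foldl
          (fun acc q => if q.1 ≠ pos then acc.insert q.2.1 q.2.2 else acc)
          PySem.Dict.empty) := by
    rw [PySem.List.enumerate_eq_map_pyRange ps ("", ""), List.foldl_map, hlen]
    congr 1
    funext acc v
    exact hbody acc v
  rw [hfoldA, foldA_items ps pos 0 PySem.Dict.empty hnd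
      (fun p _ => PySem.Dict.contains_empty p.1)]
  simp only [sub_zero, PySem.Dict.empty, List.nil_append]
  by_cases hr : 0 ≤ pos ∧ pos < (ps.length : Int)
  · have hr' : 0 ≤ pos ∧ pos < PySem.List.len (d.keys) := by
      simpa [hkeys, PySem.List.len_eq] using hr
    rw [if_pos hr, if_pos hr']
    have hi : pos.toNat < ps.length := by omega
    have hget : PySem.List.pyGetD d.keys pos "" = (ps[pos.toNat]'hi).1 := by
      rw [hkeys, PySem.List.pyGetD_eq_getElem (ps.map Prod.fst) "" hr.1 (by simpa using hr.2)]
      simp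
    rw [hget]
    exact (filter_key_eq_eraseIdx ps pos.toNat _ hi hnd rfl).symm
  · have hr' : ¬ (0 ≤ pos ∧ pos < PySem.List.len (d.keys)) := by
      simpa [hkeys, PySem.List.len_eq] using hr
    rw [if_neg hr, if_neg hr']
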